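-- pv_equiv track=rewrite | github.com/AndyVitoria/Engenharia-de-Software | src/af2dot.py | gera_grafo
-- ===== SOURCE A (Python) =====
-- def gera_grafo(automato):
--     """Função de conversão de automato em grafo
--
--     Função que converte um automato (dicionário) em um grafo (um dicionário onde as chaves são
--     o no inicial e o no de destino, e o valor armazenado são os caracteres para trasição).
--     """
--     trans = automato['trans']
--     graph = {}
--     nodes = []
--
--     for chave in trans:
--         for destino in trans[chave]:
--             nova_chave = (chave[0], destino)
--             if chave[1] == '[]':
--                 caractere = '&epsilon;'
--             else:
--                 caractere = chave[1]
--             if nova_chave in graph: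
--                 graph[nova_chave] += ',' + caractere
--             else:
--                 graph[nova_chave] = caractere
--     return graph
-- ===== SOURCE B (Python) =====
-- def gera_grafo(automato):
--     """Flatten-then-group rewrite: list every transition event once, then build each edge's
--     label at its first occurrence by joining all matching symbols in one scan."""
--     trans = automato['trans']
--     eventos = [((chave[0], destino), '&epsilon;' if chave[1] == '[]' else chave[1])
--                for chave in trans for destino in trans[chave]]
--     grafo = {}
--     for aresta, _ in eventos:
--         if aresta not in grafo:
--             grafo[aresta] = ','.join(s for e, s in eventos if e == aresta)
--     return grafo
-- ===== Notes on version B (the rewrite author's own statement) =====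
-- stated objective: alternative
-- what changed: A builds the graph incrementally, testing each edge for membership and growing its label string event by event; B first flattens the transitions into an explicit event list and then groups by edge: at each edge's first occurrence it computes the whole label in one scan over the event list with a join of the matching symbols.
import Mathlib
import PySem

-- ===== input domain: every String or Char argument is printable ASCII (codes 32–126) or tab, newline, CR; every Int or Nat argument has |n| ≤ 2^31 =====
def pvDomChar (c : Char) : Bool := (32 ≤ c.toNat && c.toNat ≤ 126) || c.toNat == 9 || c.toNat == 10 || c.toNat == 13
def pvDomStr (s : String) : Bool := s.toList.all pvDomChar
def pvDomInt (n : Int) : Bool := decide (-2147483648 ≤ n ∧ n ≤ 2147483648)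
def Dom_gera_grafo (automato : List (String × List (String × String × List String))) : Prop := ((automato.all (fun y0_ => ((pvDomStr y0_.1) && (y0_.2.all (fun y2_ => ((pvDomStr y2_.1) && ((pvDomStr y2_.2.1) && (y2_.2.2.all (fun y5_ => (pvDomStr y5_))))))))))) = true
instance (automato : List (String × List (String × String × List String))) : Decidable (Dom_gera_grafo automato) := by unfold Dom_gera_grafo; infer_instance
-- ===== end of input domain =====

-- B replaces A's incremental membership-test-and-accumulate loop by a flatten-then-group
-- algorithm: an explicit event list, with each edge's whole label computed at its first
-- occurrence by one scan-and-join over that list (objective: alternative algorithm).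

-- ===== PORT A =====
def gera_grafo (automato : List (String × List (String × String × List String))) : List (String × String × String) :=
  match (PySem.Dict.mk automato).get? "trans" with
  | none => []    -- Python raises KeyError here; excluded by Pre_
  | some trs =>
      let graph : PySem.Dict (String × String) String :=
        trs.foldl (fun g ch =>
          ch.2.2.foldl (fun g destino =>
            let nova : String × String := (ch.1, destino)
            let caractere : String := if ch.2.1 == "[]" then "&epsilon;" else ch.2.1
            match g.get? nova with
            | some v => g.insert nova (v ++ "," ++ caractere)
            | none   => g.insert nova caractere) g) PySem.Dict.empty
      graph.items.map (fun p => (p.1.1, p.1.2, p.2))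

-- ===== PORT B =====
def gera_grafo_alt (automato : List (String × List (String × String × List String))) : List (String × String × String) :=
  match (PySem.Dict.mk automato).get? "trans" with
  | none => []    -- Python raises KeyError here; excluded by Pre_
  | some trs =>
      -- eventos = [((chave[0], destino), simbolo) for chave in trans for destino in trans[chave]]
      let eventos : List ((String × String) × String) :=
        trs.flatMap (fun ch =>
          ch.2.2.map (fun destino =>
            ((ch.1, destino), if ch.2.1 == "[]" then "&epsilon;" else ch.2.1)))
      -- for aresta, _ in eventos: if aresta not in grafo: grafo[aresta] = ','.join(s for e, s in eventos if e == aresta)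
      let grafo : PySem.Dict (String × String) String :=
        eventos.foldl (fun g p =>
          if g.contains p.1 then g
          else g.insert p.1
            (PySem.Str.join "," ((eventos.filter (fun e => e.1 == p.1)).map Prod.snd))) PySem.Dict.empty
      grafo.items.map (fun p => (p.1.1, p.1.2, p.2))

-- ===== PRECONDITION & SPEC =====
-- Pre_ excludes inputs without a 'trans' key, on which A raises KeyError, and association lists
-- with duplicate keys (top level, or (state, symbol) key pairs inside trans), which do not
-- represent a Python dict unambiguously (a dict literal collapses duplicate keys).
def Pre_gera_grafo (automato : List (String × List (String × String × List String))) : Prop :=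
  (automato.map Prod.fst).Nodup ∧ "trans" ∈ automato.map Prod.fst ∧
  ∀ p ∈ automato, p.1 = "trans" → (p.2.map (fun ch => (ch.1, ch.2.1))).Nodup
instance (automato : List (String × List (String × String × List String))) : Decidable (Pre_gera_grafo automato) := by unfold Pre_gera_grafo; infer_instance

def pvWitness_gera_grafo : (List (String × List (String × String × List String))) :=
  [("trans", [("q0", "a", ["q1", "q2"]), ("q0", "[]", ["q1"])])]

def Spec_gera_grafo (automato : List (String × List (String × String × List String))) (out : List (String × String × String)) : Prop := out = gera_grafo_alt automato
instance (automato : List (String × List (String × String × List String))) (out : List (String × String × String)) : Decidable (Spec_gera_grafo automato out) := by unfold Spec_gera_grafo; infer_instance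

-- ===== CLAIM (what is proved, stated in full; the proofs are below) =====
def Claim_equal_gera_grafo : Prop := ∀ (automato : List (String × List (String × String × List String))), Dom_gera_grafo automato → Pre_gera_grafo automato → Spec_gera_grafo automato (gera_grafo automato)

-- ===== LEMMAS AND PROOFS =====

-- one accumulation event per (edge, symbol) pair; a trans entry yields one event per destino
def pvEv (ch : String × String × List String) : List ((String × String) × String) :=
  ch.2.2.map (fun d => ((ch.1, d), if ch.2.1 == "[]" then "&epsilon;" else ch.2.1))

-- A's loop body, as a step over a single event
def pvStepA (g : PySem.Dict (String × String) String) (p : (String × String) × String) :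
    PySem.Dict (String × String) String :=
  match g.get? p.1 with
  | some v => g.insert p.1 (v ++ "," ++ p.2)
  | none   => g.insert p.1 p.2

-- B's loop body (F = the label function computed from the full event list)
def pvStepB (F : String × String → String) (g : PySem.Dict (String × String) String)
    (p : (String × String) × String) : PySem.Dict (String × String) String :=
  if g.contains p.1 then g else g.insert p.1 (F p.1)

def pvJoin1 (l : List String) : String := PySem.Str.join "," l

-- the label accumulated for edge k over the events p
def pvVal (p : List ((String × String) × String)) (k : String × String) : String :=
  pvJoin1 ((p.filter (fun e => e.1 == k)).map Prod.snd)

-- the dict A has built after processing the events p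
def pvAccA (p : List ((String × String) × String)) : PySem.Dict (String × String) String :=
  PySem.Dict.mk ((PySem.Set.ofList (p.map Prod.fst)).map (fun k => (k, pvVal p k)))

-- the dict B has built after processing the events p (labels taken from the fixed F)
def pvAccB (F : String × String → String) (p : List ((String × String) × String)) :
    PySem.Dict (String × String) String :=
  PySem.Dict.mk ((PySem.Set.ofList (p.map Prod.fst)).map (fun k => (k, F k)))

lemma pv_ofList_snoc (l : List (String × String)) (a : String × String) :
    PySem.Set.ofList (l ++ [a]) = if a ∈ l then PySem.Set.ofList l else PySem.Set.ofList l ++ [a] := by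
  rw [PySem.Set.ofList_append_singleton, PySem.Set.add_eq_ite]
  simp [PySem.Set.mem_ofList]

lemma pv_find?_map_key (k : String × String) (f : String × String → String) :
    ∀ l : List (String × String),
      ((l.map (fun k' => (k', f k'))).find? (fun q => q.1 == k)).map Prod.snd
        = if k ∈ l then some (f k) else none := by
  intro l
  induction l with
  | nil => simp
  | cons a t ih =>
    by_cases ha : a = k
    · subst ha; simp
    · have hb : (a == k) = false := by simpa using ha
      rw [List.map_cons]
      simp only [List.find?_cons, hb]
      rw [ih]
      simp [Ne.symm ha]

lemma pv_get?_pvAccA (p : List ((String × String) × String)) (k : String × String) :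
    (pvAccA p).get? k = if k ∈ p.map Prod.fst then some (pvVal p k) else none := by
  show ((((PySem.Set.ofList (p.map Prod.fst)).map (fun k' => (k', pvVal p k'))).find?
      (fun q => q.1 == k)).map Prod.snd) = _
  rw [pv_find?_map_key]
  by_cases h : k ∈ p.map Prod.fst
  · simp [h, (PySem.Set.mem_ofList _ _).mpr h]
  · simp [h]

lemma pv_get?_pvAccB (F : String × String → String) (p : List ((String × String) × String))
    (k : String × String) :
    (pvAccB F p).get? k = if k ∈ p.map Prod.fst then some (F k) else none := by
  show ((((PySem.Set.ofList (p.map Prod.fst)).map (fun k' => (k', F k'))).find?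
      (fun q => q.1 == k)).map Prod.snd) = _
  rw [pv_find?_map_key]
  by_cases h : k ∈ p.map Prod.fst
  · simp [h, (PySem.Set.mem_ofList _ _).mpr h]
  · simp [h]

lemma pv_chars_join_snoc (sep x : List Char) : ∀ (ls : List (List Char)), ls ≠ [] →
    PySem.Chars.join sep (ls ++ [x]) = PySem.Chars.join sep ls ++ sep ++ x := by
  intro ls
  induction ls with
  | nil => simp
  | cons a t ih =>
    intro _
    cases t with
    | nil => simp [PySem.Chars.join, List.intercalate, List.intersperse]
    | cons b r =>
      have h1 : PySem.Chars.join sep (a :: b :: (r ++ [x])) = a ++ sep ++ PySem.Chars.join sep (b :: (r ++ [x])) := by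
        simp [PySem.Chars.join, List.intercalate, List.intersperse]
      have h2 : PySem.Chars.join sep (a :: b :: r) = a ++ sep ++ PySem.Chars.join sep (b :: r) := by
        simp [PySem.Chars.join, List.intercalate, List.intersperse]
      simp only [List.cons_append] at *
      rw [h1, ih (by simp), h2]
      simp

lemma pvJoin1_singleton (s : String) : pvJoin1 [s] = s := by
  simp [pvJoin1, PySem.Str.join, PySem.Chars.join, List.intercalate]

lemma pvJoin1_snoc (v : List String) (s : String) (hv : v ≠ []) :
    pvJoin1 (v ++ [s]) = pvJoin1 v ++ "," ++ s := by
  unfold pvJoin1 PySem.Str.join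
  rw [List.map_append, List.map_singleton,
    pv_chars_join_snoc _ _ _ (by simpa using hv),
    String.ofList_append, String.ofList_append]
  simp

lemma pvVal_append_ne (p : List ((String × String) × String)) (e : (String × String) × String)
    (k : String × String) (hk : k ≠ e.1) : pvVal (p ++ [e]) k = pvVal p k := by
  unfold pvVal
  rw [List.filter_append]
  simp [show (e.1 == k) = false by simpa using (Ne.symm hk)]

lemma pvVal_append_self (p : List ((String × String) × String)) (e : (String × String) × String)
    (h : e.1 ∈ p.map Prod.fst) : pvVal (p ++ [e]) e.1 = pvVal p e.1 ++ "," ++ e.2 := by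
  unfold pvVal
  rw [List.filter_append, List.map_append]
  have hne : (p.filter (fun x => x.1 == e.1)).map Prod.snd ≠ [] := by
    obtain ⟨x, hx, hx1⟩ := List.mem_map.mp h
    have : x ∈ p.filter (fun x => x.1 == e.1) := List.mem_filter.mpr ⟨hx, by simpa using hx1⟩
    intro hc
    simp only [List.map_eq_nil_iff] at hc
    rw [hc] at this; exact List.not_mem_nil this
  rw [show (List.filter (fun x => x.1 == e.1) [e]) = [e] by simp, List.map_singleton,
    pvJoin1_snoc _ _ hne]

lemma pvVal_append_fresh (p : List ((String × String) × String)) (e : (String × String) × String)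
    (h : e.1 ∉ p.map Prod.fst) : pvVal (p ++ [e]) e.1 = e.2 := by
  unfold pvVal
  have hnil : p.filter (fun x => x.1 == e.1) = [] := by
    rw [List.filter_eq_nil_iff]
    intro x hx hc
    exact h (List.mem_map.mpr ⟨x, hx, by simpa using hc⟩)
  rw [List.filter_append, hnil,
    show (List.filter (fun x => x.1 == e.1) [e]) = [e] by simp]
  simpa using pvJoin1_singleton e.2

lemma pv_stepA (p : List ((String × String) × String)) (e : (String × String) × String) :
    pvStepA (pvAccA p) e = pvAccA (p ++ [e]) := by
  unfold pvStepA
  rw [pv_get?_pvAccA]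
  by_cases h : e.1 ∈ p.map Prod.fst
  · rw [if_pos h]
    apply PySem.Dict.ext
    have hc : (pvAccA p).contains e.1 = true := by
      rw [PySem.Dict.contains_eq_isSome_get?, pv_get?_pvAccA, if_pos h]; rfl
    rw [PySem.Dict.items_insert_of_contains _ _ hc]
    show ((PySem.Set.ofList (p.map Prod.fst)).map (fun k => (k, pvVal p k))).map _
        = (PySem.Set.ofList ((p ++ [e]).map Prod.fst)).map _
    rw [List.map_map, List.map_append, List.map_singleton, pv_ofList_snoc, if_pos h]
    apply List.map_congr_left
    intro k hk
    by_cases hke : k = e.1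
    · subst hke
      simp only [Function.comp_def, beq_self_eq_true, if_pos]
      rw [pvVal_append_self p e h]
    · simp only [Function.comp_def, show (k == e.1) = false by simpa using hke, Bool.false_eq_true,
        if_false]
      rw [pvVal_append_ne p e k hke]
  · rw [if_neg h]
    apply PySem.Dict.ext
    have hc : (pvAccA p).contains e.1 = false := by
      rw [PySem.Dict.contains_eq_isSome_get?, pv_get?_pvAccA, if_neg h]; rfl
    rw [PySem.Dict.items_insert_of_not_contains _ _ hc]
    show ((PySem.Set.ofList (p.map Prod.fst)).map (fun k => (k, pvVal p k))) ++ _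
        = (PySem.Set.ofList ((p ++ [e]).map Prod.fst)).map _
    rw [List.map_append, List.map_singleton, pv_ofList_snoc, if_neg h, List.map_append,
      List.map_singleton]
    congr 1
    · apply List.map_congr_left
      intro k hk
      have hk' : k ∈ p.map Prod.fst := (PySem.Set.mem_ofList _ _).mp hk
      rw [pvVal_append_ne p e k (by rintro rfl; exact h hk')]
    · rw [pvVal_append_fresh p e h]

lemma pv_stepB (F : String × String → String) (p : List ((String × String) × String))
    (e : (String × String) × String) :
    pvStepB F (pvAccB F p) e = pvAccB F (p ++ [e]) := by
  unfold pvStepB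
  have hcontains : (pvAccB F p).contains e.1 = decide (e.1 ∈ p.map Prod.fst) := by
    rw [PySem.Dict.contains_eq_isSome_get?, pv_get?_pvAccB]
    by_cases h : e.1 ∈ p.map Prod.fst <;> simp [h]
  rw [hcontains]
  by_cases h : e.1 ∈ p.map Prod.fst
  · rw [if_pos (by simpa using h)]
    unfold pvAccB
    rw [List.map_append, List.map_singleton, pv_ofList_snoc, if_pos h]
  · rw [if_neg (by simpa using h)]
    apply PySem.Dict.ext
    have hc : (pvAccB F p).contains e.1 = false := by rw [hcontains]; simpa using h
    rw [PySem.Dict.items_insert_of_not_contains _ _ hc]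
    show ((PySem.Set.ofList (p.map Prod.fst)).map (fun k => (k, F k))) ++ _
        = (PySem.Set.ofList ((p ++ [e]).map Prod.fst)).map _
    rw [List.map_append, List.map_singleton, pv_ofList_snoc, if_neg h, List.map_append,
      List.map_singleton]

lemma pv_foldA (es : List ((String × String) × String)) :
    ∀ p, es.foldl pvStepA (pvAccA p) = pvAccA (p ++ es) := by
  induction es with
  | nil => intro p; simp
  | cons e t ih =>
    intro p
    rw [List.foldl_cons, pv_stepA, ih (p ++ [e])]
    simp

lemma pv_foldB (F : String × String → String) (es : List ((String × String) × String)) :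
    ∀ p, es.foldl (pvStepB F) (pvAccB F p) = pvAccB F (p ++ es) := by
  induction es with
  | nil => intro p; simp
  | cons e t ih =>
    intro p
    rw [List.foldl_cons, pv_stepB, ih (p ++ [e])]
    simp

-- A's nested loop is the fold of pvStepA over the flattened event list
lemma pv_portA_fold (trans : List (String × String × List String)) :
    trans.foldl (fun g ch =>
      ch.2.2.foldl (fun g destino =>
        let nova : String × String := (ch.1, destino)
        let caractere : String := if ch.2.1 == "[]" then "&epsilon;" else ch.2.1
        match g.get? nova with
        | some v => g.insert nova (v ++ "," ++ caractere)
        | none   => g.insert nova caractere) g) PySem.Dict.empty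
    = (trans.flatMap pvEv).foldl pvStepA PySem.Dict.empty := by
  rw [List.foldl_flatMap]
  have hfun : (fun (g : PySem.Dict (String × String) String) ch =>
      ch.2.2.foldl (fun g destino =>
        let nova : String × String := (ch.1, destino)
        let caractere : String := if ch.2.1 == "[]" then "&epsilon;" else ch.2.1
        match g.get? nova with
        | some v => g.insert nova (v ++ "," ++ caractere)
        | none   => g.insert nova caractere) g)
      = (fun acc ch => List.foldl pvStepA acc (pvEv ch)) := by
    funext g ch
    rw [pvEv, List.foldl_map]
    rfl
  rw [hfun]

-- ===== VERDICT (by name: the statement is the Claim_ definition above) =====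
theorem gera_grafo_spec : Claim_equal_gera_grafo := by
  intro automato _ _
  unfold Spec_gera_grafo gera_grafo gera_grafo_alt
  cases h : (PySem.Dict.mk automato).get? "trans" with
  | none => rfl
  | some trs =>
      simp only []
      rw [pv_portA_fold]
      have hA : List.foldl pvStepA PySem.Dict.empty (trs.flatMap pvEv)
          = pvAccA (trs.flatMap pvEv) := by
        have h := pv_foldA (trs.flatMap pvEv) []
        rw [List.nil_append] at h
        exact h
      have hB : List.foldl (pvStepB (fun k => pvVal (trs.flatMap pvEv) k)) PySem.Dict.empty
            (trs.flatMap pvEv)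
          = pvAccB (fun k => pvVal (trs.flatMap pvEv) k) (trs.flatMap pvEv) := by
        have h := pv_foldB (fun k => pvVal (trs.flatMap pvEv) k) (trs.flatMap pvEv) []
        rw [List.nil_append] at h
        exact h
      show (List.foldl pvStepA PySem.Dict.empty (trs.flatMap pvEv)).items.map
            (fun p => (p.1.1, p.1.2, p.2))
          = (List.foldl (pvStepB (fun k => pvVal (trs.flatMap pvEv) k)) PySem.Dict.empty
              (trs.flatMap pvEv)).items.map (fun p => (p.1.1, p.1.2, p.2))
      rw [hA, hB]
      rfl
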